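-- pv_equiv track=rewrite | github.com/gilleswaeber/polybench-doitgen-jacobi | doitgen/doitgen_mpi_plot.py | group_processes_by_run
-- ===== SOURCE A (Python) =====
-- def group_processes_by_run(files):
--     bench_per_run = {}
--     for file in files:
--         key = file.split(".")[2][:2] # extract r0 or r1 etc...
--         if (key not in bench_per_run):
--             bench_per_run[key] = list()
--         bench_per_run[key].append(file)
--     return bench_per_run
-- ===== SOURCE B (Python) =====
-- def group_processes_by_run(files):
--     # Two-pass alternative: compute all keys once, take distinct keys in
--     # first-occurrence order, then collect each key's files by filtering.
--     keys = [f.split(".")[2][:2] for f in files]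
--     order = list(dict.fromkeys(keys))
--     return {k: [f for f, fk in zip(files, keys) if fk == k] for k in order}
-- ===== Notes on version B (the rewrite author's own statement) =====
-- stated objective: alternative
-- what changed: Instead of one pass that mutates a dict per file, B precomputes the key list, dedups it for the key order, and builds each bucket by filtering the file list per key (a map/filter formulation, O(n*k) scans vs A's single hashed pass).
-- outside the precondition, e.g. on group_processes_by_run(['ab']): A raises IndexError, B raises IndexError
import Mathlib
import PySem

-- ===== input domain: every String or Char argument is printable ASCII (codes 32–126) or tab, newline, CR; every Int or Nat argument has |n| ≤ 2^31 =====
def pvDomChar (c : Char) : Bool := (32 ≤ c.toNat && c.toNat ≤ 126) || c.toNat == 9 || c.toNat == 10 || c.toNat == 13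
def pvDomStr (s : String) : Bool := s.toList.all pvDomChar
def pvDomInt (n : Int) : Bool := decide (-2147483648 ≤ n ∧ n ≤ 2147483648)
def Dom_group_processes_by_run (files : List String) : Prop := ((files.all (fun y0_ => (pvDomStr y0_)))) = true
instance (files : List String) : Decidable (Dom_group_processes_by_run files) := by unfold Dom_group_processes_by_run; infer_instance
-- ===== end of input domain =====

-- B replaces A's single dict-mutating pass by a two-pass map/dedup/filter formulation; equal output (alternative, not faster).


-- ===== PORT A =====
-- the key expression file.split(".")[2][:2] (shared by both Pythons verbatim)
def pvRunKey (f : String) : String :=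
  PySem.Str.slice (PySem.List.pyGetD ((PySem.Str.split? f ".").getD []) 2 "") none (some 2)

def group_processes_by_run (files : List String) : List (String × List String) :=
  (files.foldl (fun d f =>
      let key := pvRunKey f
      let d1 := if d.contains key then d else d.insert key ([] : List String)
      d1.modify key [] (fun l => l ++ [f]))
    PySem.Dict.empty).items

-- ===== PORT B =====
def group_processes_by_run_alt (files : List String) : List (String × List String) :=
  let keys := files.map pvRunKey
  let order := PySem.List.dedup keys
  order.map (fun k => (k, ((files.zip keys).filter (fun p => p.2 == k)).map (fun p => p.1)))

-- ===== PRECONDITION & SPEC =====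
-- Pre_ excludes exactly the files whose name has fewer than two dots, where A's `file.split(".")[2]` raises IndexError.
def Pre_group_processes_by_run (files : List String) : Prop :=
  ∀ f ∈ files, PySem.Raise.InRange ((PySem.Str.split? f ".").getD []).length 2
instance (files : List String) : Decidable (Pre_group_processes_by_run files) := by unfold Pre_group_processes_by_run; infer_instance
def pvWitness_group_processes_by_run : List String := ["x.y.run1.t", "x.y.run2", "x.y.run1.u"]

def Spec_group_processes_by_run (files : List String) (out : List (String × List String)) : Prop := out = group_processes_by_run_alt files
instance (files : List String) (out : List (String × List String)) : Decidable (Spec_group_processes_by_run files out) := by unfold Spec_group_processes_by_run; infer_instance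

-- ===== CLAIM (what is proved, stated in full; the proofs are below) =====
def Claim_equal_group_processes_by_run : Prop := ∀ (files : List String), Dom_group_processes_by_run files → Pre_group_processes_by_run files → Spec_group_processes_by_run files (group_processes_by_run files)

-- ===== LEMMAS AND PROOFS =====

-- Dict.modify unfolded to insert (definitional)
theorem pv_modify_eq {κ ν : Type} [BEq κ] [LawfulBEq κ] (d : PySem.Dict κ ν) (k : κ) (d0 : ν) (f : ν → ν) :
    d.modify k d0 f = d.insert k (f (d.getD k d0)) := PySem.Dict.ext_iff.mpr rfl

-- l.zip (l.map g) specialised from List.zip_map'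
theorem pv_zip_map_self {α β : Type} (l : List α) (g : α → β) :
    l.zip (l.map g) = l.map (fun a => (a, g a)) := by
  simpa using List.zip_map' (f := id) (g := g) (l := l)

-- A's loop body equals a single `modify` (the setdefault + append collapse)
theorem pv_stepA (d : PySem.Dict String (List String)) (f : String) :
    (let key := pvRunKey f
     let d1 := if d.contains key then d else d.insert key ([] : List String)
     d1.modify key [] (fun l => l ++ [f])) = d.modify (pvRunKey f) [] (fun l => l ++ [f]) := by
  by_cases h : d.contains (pvRunKey f)
  · simp [h]
  · simp only [h, Bool.false_eq_true, if_false]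
    rw [pv_modify_eq, pv_modify_eq, PySem.Dict.getD_insert_self, PySem.Dict.insert_insert_self,
      PySem.Dict.getD_of_not_contains _ _ (by simpa using h)]

theorem pv_foldA (files : List String) :
    files.foldl (fun d f =>
      let key := pvRunKey f
      let d1 := if d.contains key then d else d.insert key ([] : List String)
      d1.modify key [] (fun l => l ++ [f])) PySem.Dict.empty
    = (files.map (fun f => (pvRunKey f, f))).foldl
        (fun d p => d.modify p.1 [] (fun l => l ++ [p.2])) PySem.Dict.empty := by
  rw [List.foldl_map]
  exact List.foldl_ext _ _ _ (fun d f _ => pv_stepA d f)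

theorem group_eq (files : List String) :
    group_processes_by_run files = group_processes_by_run_alt files := by
  unfold group_processes_by_run group_processes_by_run_alt
  rw [pv_foldA]
  set K := pvRunKey with hK
  have hnd : ((files.map (fun f => (K f, f))).foldl
      (fun d p => d.modify p.1 [] (fun l => l ++ [p.2])) PySem.Dict.empty).keys.Nodup := by
    rw [List.foldl_map]
    exact PySem.Dict.nodup_keys_foldl_modify_key files K [] (fun _ f l => l ++ [f]) _ (by simp)
  rw [PySem.Dict.items_eq_map_keys _ hnd []]
  have hkeys : ((files.map (fun f => (K f, f))).foldl
      (fun d p => d.modify p.1 [] (fun l => l ++ [p.2])) PySem.Dict.empty).keys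
      = PySem.List.dedup (files.map K) := by
    rw [List.foldl_map, PySem.Dict.keys_foldl_modify_key files K [] (fun _ f l => l ++ [f])]
    exact (PySem.List.dedup_eq_ofList (files.map K)).symm
  rw [hkeys]
  refine List.map_congr_left (fun k _ => ?_)
  rw [PySem.Dict.getD_foldl_modify_append]
  rw [pv_zip_map_self files K]
  simp [List.filter_map, List.map_map, Function.comp_def]

-- ===== VERDICT (by name: the statement is the Claim_ definition above) =====
theorem group_processes_by_run_spec : Claim_equal_group_processes_by_run := by
  intro files _ _
  exact group_eq files
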